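-- pv_equiv track=rewrite | github.com/ngartiexauce/Projet-CMI-PIX | flask_app.py | nb_etu_non_certifies
-- ===== SOURCE A (Python) =====
-- def nb_etu_non_certifies(data):
--     tab=[]
--     for i in range(len(data[0])):
--         tab.append(0)
--     for j in range(len(data)):
--         for g in range(len(data[0])):
--             if data[j][g]==0:
--                 tab[g]=tab[g]+1
--     return tab
-- ===== SOURCE B (Python) =====
-- def nb_etu_non_certifies(data):
--     ncols = len(data[0])
--
--     def solve(rows):
--         if len(rows) == 0:
--             return [0] * ncols
--         if len(rows) == 1:
--             r = rows[0]
--             return [1 if r[c] == 0 else 0 for c in range(ncols)]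
--         mid = len(rows) // 2
--         left = solve(rows[:mid])
--         right = solve(rows[mid:])
--         return [x + y for x, y in zip(left, right)]
--
--     return solve(data)
-- ===== Notes on version B (the rewrite author's own statement) =====
-- stated objective: alternative
-- what changed: Replaces A's shared mutable table updated by row-major nested index loops with a divide-and-conquer recursion: a single row becomes its zero-indicator vector and the counts of the two halves of the row list are combined by elementwise vector addition.
import Mathlib
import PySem

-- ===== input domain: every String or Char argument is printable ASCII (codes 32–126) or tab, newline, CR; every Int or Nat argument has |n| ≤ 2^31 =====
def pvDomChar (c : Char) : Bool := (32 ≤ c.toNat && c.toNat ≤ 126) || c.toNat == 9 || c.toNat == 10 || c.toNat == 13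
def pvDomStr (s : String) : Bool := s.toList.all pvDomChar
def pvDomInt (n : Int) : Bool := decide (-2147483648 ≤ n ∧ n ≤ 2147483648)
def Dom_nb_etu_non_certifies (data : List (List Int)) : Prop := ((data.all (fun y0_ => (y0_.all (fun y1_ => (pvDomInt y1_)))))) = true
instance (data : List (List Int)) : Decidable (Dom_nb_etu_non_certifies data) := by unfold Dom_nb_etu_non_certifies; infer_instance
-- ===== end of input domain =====

-- B replaces A's shared mutable table updated by row-major index loops with a
-- divide-and-conquer recursion: a single row becomes its zero-indicator vector,
-- halves are combined by elementwise vector addition. Same result, different algorithm.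

-- ===== PORT A =====
def nb_etu_non_certifies (data : List (List Int)) : List Int :=
  (PySem.List.pyRange 0 (data.length : Int) 1).foldl (fun tab j =>
    (PySem.List.pyRange 0 ((PySem.List.pyGetD data 0 []).length : Int) 1).foldl (fun tab g =>
      if PySem.List.pyGetD (PySem.List.pyGetD data j []) g 0 == 0 then
        PySem.List.pySetD tab g (PySem.List.pyGetD tab g 0 + 1)
      else tab) tab)
    ((PySem.List.pyRange 0 ((PySem.List.pyGetD data 0 []).length : Int) 1).foldl
      (fun tab _ => tab ++ [(0 : Int)]) [])

-- ===== PORT B =====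
-- solve(rows) from Source B: divide and conquer over the row list.
-- rows[:mid] / rows[mid:] with 0 ≤ mid ≤ len(rows) are exactly List.take / List.drop.
def pvSolve (ncols : Nat) (rows : List (List Int)) : List Int :=
  if rows.length = 0 then List.replicate ncols 0
  else if rows.length = 1 then
    (List.range ncols).map (fun (c : Nat) =>
      if PySem.List.pyGetD (rows.headD []) ((c : Nat) : Int) 0 == 0 then (1 : Int) else 0)
  else
    let mid := rows.length / 2
    List.zipWith (· + ·) (pvSolve ncols (rows.take mid)) (pvSolve ncols (rows.drop mid))
termination_by rows.length
decreasing_by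
  · simp only [List.length_take]; omega
  · simp only [List.length_drop]; omega

def nb_etu_non_certifies_alt (data : List (List Int)) : List Int :=
  pvSolve (PySem.List.pyGetD data 0 []).length data

-- ===== PRECONDITION & SPEC =====
-- Pre_ excludes exactly the inputs on which the Python A raises IndexError:
-- empty data (data[0]) and ragged data with a row shorter than the first row (data[j][g]).
def Pre_nb_etu_non_certifies (data : List (List Int)) : Prop :=
  data ≠ [] ∧ ∀ row ∈ data, (data.headD []).length ≤ row.length
instance (data : List (List Int)) : Decidable (Pre_nb_etu_non_certifies data) := by
  unfold Pre_nb_etu_non_certifies; infer_instance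
def pvWitness_nb_etu_non_certifies : List (List Int) := [[0, 1, 0], [2, 0, 3]]

def Spec_nb_etu_non_certifies (data : List (List Int)) (out : List Int) : Prop := out = nb_etu_non_certifies_alt data
instance (data : List (List Int)) (out : List Int) : Decidable (Spec_nb_etu_non_certifies data out) := by unfold Spec_nb_etu_non_certifies; infer_instance

-- ===== CLAIM (what is proved, stated in full; the proofs are below) =====
def Claim_equal_nb_etu_non_certifies : Prop := ∀ (data : List (List Int)), Dom_nb_etu_non_certifies data → Pre_nb_etu_non_certifies data → Spec_nb_etu_non_certifies data (nb_etu_non_certifies data)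

-- ===== LEMMAS AND PROOFS =====

-- A's inner-loop body, with the Int range index already reduced to a Nat.
def zstep (row tab : List Int) (g : Nat) : List Int :=
  if row.getD g 0 == 0 then tab.set g (tab.getD g 0 + 1) else tab

theorem length_zfold (row : List Int) (gs : List Nat) (tab : List Int) :
    (gs.foldl (zstep row) tab).length = tab.length := by
  induction gs generalizing tab with
  | nil => rfl
  | cons g gs ih =>
    simp only [List.foldl_cons]
    rw [ih]
    unfold zstep
    split <;> simp

theorem getD_zfold (row : List Int) (gs : List Nat) (tab : List Int)
    (hgs : ∀ g ∈ gs, g < tab.length) (k : Nat) :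
    (gs.foldl (zstep row) tab).getD k 0
      = tab.getD k 0 + ((gs.countP (fun g => g == k && (row.getD g 0 == 0))) : Int) := by
  induction gs generalizing tab with
  | nil => simp
  | cons g gs ih =>
    simp only [List.foldl_cons, List.countP_cons]
    rw [ih _ (by intro x hx; rw [show (zstep row tab g).length = tab.length by
          unfold zstep; split <;> simp]; exact hgs x (List.mem_cons_of_mem _ hx))]
    unfold zstep
    cases hz : (row.getD g 0 == 0) with
    | false =>
      simp only [Bool.false_eq_true, if_false, Bool.and_false]
      push_cast
      ring
    | true =>
      simp only [if_true, Bool.and_true]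
      have hg : g < tab.length := hgs g (List.mem_cons_self ..)
      by_cases hk : g = k
      · subst hk
        have hset : (tab.set g (tab.getD g 0 + 1)).getD g 0 = tab.getD g 0 + 1 := by
          simp [List.getD, hg]
        rw [hset]
        simp only [beq_self_eq_true, if_true]
        push_cast
        ring
      · have hset : (tab.set g (tab.getD g 0 + 1)).getD k 0 = tab.getD k 0 := by
          simp [List.getD, List.getElem?_set_ne hk]
        rw [hset]
        have : (g == k) = false := by simpa using hk
        simp only [this]
        push_cast
        ring

theorem countP_range_eq (p : Nat → Bool) (n k : Nat) (hk : k < n) :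
    (List.range n).countP (fun g => g == k && p g) = if p k then 1 else 0 := by
  induction n with
  | zero => omega
  | succ n ih =>
    rw [List.range_succ, List.countP_append]
    by_cases h : k < n
    · rw [ih h]
      simp only [List.countP_singleton]
      have : (n == k) = false := by simp; omega
      simp [this]
    · have hkn : k = n := by omega
      subst hkn
      have h0 : (List.range k).countP (fun g => g == k && p g) = 0 := by
        rw [List.countP_eq_zero]
        intro g hg
        simp at hg ⊢
        intro h; omega
      rw [h0]
      simp [List.countP_singleton]

theorem getD_outer (n : Nat) (rows : List (List Int)) (tab : List Int)
    (htab : tab.length = n) (k : Nat) (hk : k < n) :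
    (rows.foldl (fun tab row => (List.range n).foldl (zstep row) tab) tab).getD k 0
      = tab.getD k 0 + ((rows.countP (fun row => row.getD k 0 == 0)) : Int) := by
  induction rows generalizing tab with
  | nil => simp
  | cons row rows ih =>
    simp only [List.foldl_cons, List.countP_cons]
    rw [ih _ (by rw [length_zfold]; exact htab)]
    rw [getD_zfold _ _ _ (by intro g hg; rw [htab]; exact List.mem_range.mp hg)]
    rw [countP_range_eq (fun g => row.getD g 0 == 0) n k hk]
    cases hz : (row.getD k 0 == 0) <;> simp only [Bool.false_eq_true, if_false, if_true] <;> push_cast <;> ring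

theorem length_outer (n : Nat) (rows : List (List Int)) (tab : List Int) :
    (rows.foldl (fun tab row => (List.range n).foldl (zstep row) tab) tab).length
      = tab.length := by
  induction rows generalizing tab with
  | nil => rfl
  | cons row rows ih => simp only [List.foldl_cons]; rw [ih, length_zfold]

-- A's port, rewritten as the Nat-indexed fold over the rows themselves.
theorem portA_eq (data : List (List Int)) :
    nb_etu_non_certifies data
      = data.foldl
          (fun tab row => (List.range (PySem.List.pyGetD data 0 []).length).foldl (zstep row) tab)
          (List.replicate (PySem.List.pyGetD data 0 []).length 0) := by
  unfold nb_etu_non_certifies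
  rw [PySem.List.foldl_pyRange_zero_pyGetD' data []
        (f := fun tab row =>
          (PySem.List.pyRange 0 ((PySem.List.pyGetD data 0 []).length : Int) 1).foldl (fun tab g =>
            if PySem.List.pyGetD row g 0 == 0 then
              PySem.List.pySetD tab g (PySem.List.pyGetD tab g 0 + 1)
            else tab) tab)]
  have htab : (PySem.List.pyRange 0 ((PySem.List.pyGetD data 0 []).length : Int) 1).foldl
      (fun tab _ => tab ++ [(0 : Int)]) []
      = List.replicate (PySem.List.pyGetD data 0 []).length 0 := by
    rw [PySem.List.foldl_append_singleton_eq_map (f := fun _ => (0 : Int))]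
    simp [PySem.List.pyRange_zero_nat, Function.comp_def, List.map_const']
  rw [htab]
  apply PySem.List.foldl_congr_mem
  intro tab row _
  rw [PySem.List.pyRange_zero_nat, List.foldl_map]
  apply PySem.List.foldl_congr_mem
  intro t g _
  unfold zstep
  simp [PySem.List.pyGetD_natCast, PySem.List.pySetD_natCast]

theorem zipWith_map_same {a b : Type} (f g : a -> b) (h : b -> b -> b) (l : List a) :
    List.zipWith h (l.map f) (l.map g) = l.map (fun x => h (f x) (g x)) := by
  induction l with
  | nil => rfl
  | cons x xs ih => simp [ih]

-- B's divide-and-conquer returns, for every row list, the per-column zero counts.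
theorem pvSolve_eq (ncols : Nat) (rows : List (List Int)) :
    pvSolve ncols rows
      = (List.range ncols).map (fun c => ((rows.countP (fun row => row.getD c 0 == 0)) : Int)) := by
  induction hn : rows.length using Nat.strong_induction_on generalizing rows with
  | _ n ih =>
  unfold pvSolve
  by_cases h0 : rows.length = 0
  · rcases List.length_eq_zero_iff.mp h0 with rfl
    simp
  · by_cases h1 : rows.length = 1
    · obtain ⟨r, rfl⟩ : ∃ r, rows = [r] := by
        cases rows with
        | nil => simp at h1
        | cons a t => cases t with
          | nil => exact ⟨a, rfl⟩
          | cons b t' => simp at h1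
      simp only [h1, List.headD_cons, List.countP_cons, List.countP_nil]
      apply List.map_congr_left
      intro c _
      simp only [PySem.List.pyGetD_natCast]
      split <;> simp
    · simp only [h0, h1, if_false]
      have hlen : rows.length ≥ 2 := by omega
      set mid := rows.length / 2 with hmid
      have ht : (rows.take mid).length = mid := by simp; omega
      have hd : (rows.drop mid).length = rows.length - mid := by simp
      rw [ih (rows.take mid).length (by omega) _ rfl,
          ih (rows.drop mid).length (by omega) _ rfl]
      rw [zipWith_map_same]
      apply List.map_congr_left
      intro c _
      conv_rhs => rw [show rows = rows.take mid ++ rows.drop mid from (List.take_append_drop mid rows).symm]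
      rw [List.countP_append]
      push_cast
      ring

-- ===== VERDICT (by name: the statement is the Claim_ definition above) =====
theorem nb_etu_non_certifies_spec : Claim_equal_nb_etu_non_certifies := by
  intro data _ _
  unfold Spec_nb_etu_non_certifies
  rw [portA_eq]
  unfold nb_etu_non_certifies_alt
  rw [pvSolve_eq]
  set n := (PySem.List.pyGetD data 0 []).length with hn
  apply List.ext_getElem
  · rw [length_outer]; simp
  · intro k hk1 hk2
    have hkn : k < n := by
      have := hk1; rw [length_outer] at this; simpa using this
    have hA : (data.foldl (fun tab row => (List.range n).foldl (zstep row) tab)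
        (List.replicate n 0))[k] = (data.foldl (fun tab row => (List.range n).foldl (zstep row) tab)
        (List.replicate n 0)).getD k 0 := by
      rw [List.getD_eq_getElem _ _ hk1]
    rw [hA, getD_outer n data _ (by simp) k hkn]
    simp [hkn]
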